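-- pv_equiv track=rewrite | github.com/ameydhavle/dcisionai-mcp-platform | cleanup_archive/mcp_manufacturing_cleanup_20251009_153156/src_unused/auth/middleware.py | _requires_auth
-- ===== SOURCE A (Python) =====
-- def _requires_auth(path: str) -> bool:
--     """Check if endpoint requires authentication."""
--     # Public endpoints that don't require authentication
--     public_endpoints = {
--         '/',
--         '/health',
--         '/health/detailed',
--         '/docs',
--         '/openapi.json'
--     }
--
--     # Check for exact matches first, then prefix matches
--     if path in public_endpoints:
--         return False
--
--     # For prefix matches, only match exact path segments
--     for endpoint in public_endpoints:
--         if endpoint != '/' and path.startswith(endpoint + '/'):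
--             return False
--
--     return True
-- ===== SOURCE B (Python) =====
-- def _requires_auth(path: str) -> bool:
--     """Check if endpoint requires authentication."""
--     public_endpoints = {
--         '/',
--         '/health',
--         '/health/detailed',
--         '/docs',
--         '/openapi.json'
--     }
--
--     if path in public_endpoints:
--         return False
--
--     # Single pass over the path: at each '/', test the directory prefix
--     # accumulated so far against the set (instead of testing each endpoint
--     # against the path with startswith).
--     prefix = ''
--     for ch in path:
--         if ch == '/' and prefix != '' and prefix != '/' and prefix in public_endpoints:
--             return False
--         prefix += ch
--     return True
-- ===== Notes on version B (the rewrite author's own statement) =====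
-- stated objective: alternative
-- what changed: Replaces the loop over endpoints testing whether the path starts with each endpoint plus a slash by a single left-to-right pass over the path that tests the accumulated directory prefix at each slash against the set.
import Mathlib
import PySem

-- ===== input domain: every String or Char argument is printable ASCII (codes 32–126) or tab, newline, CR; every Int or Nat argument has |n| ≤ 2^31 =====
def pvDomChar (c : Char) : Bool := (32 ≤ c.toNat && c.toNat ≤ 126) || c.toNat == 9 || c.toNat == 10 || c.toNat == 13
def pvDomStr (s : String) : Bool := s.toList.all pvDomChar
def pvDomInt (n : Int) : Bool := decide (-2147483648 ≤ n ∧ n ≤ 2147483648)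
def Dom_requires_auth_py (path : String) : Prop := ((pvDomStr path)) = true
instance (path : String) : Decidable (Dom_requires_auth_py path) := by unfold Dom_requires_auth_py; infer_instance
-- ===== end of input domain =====

-- B replaces A's loop of startswith tests over the endpoints by one pass over the
-- path testing each '/'-bounded prefix against the set (objective: alternative).

-- ===== PORT A =====
-- Python set iterated only through membership / an existential any, so iteration
-- order is irrelevant; 'endpoint + "/"' is ported as list append on .toList
-- (exact: string concatenation = concatenation of the character lists).
def requires_auth_py (path : String) : Bool :=
  let public_endpoints : List String :=
    ["/", "/health", "/health/detailed", "/docs", "/openapi.json"]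
  if public_endpoints.contains path then false
  else if public_endpoints.any
      (fun e => decide (e ≠ "/") && PySem.Chars.startswith path.toList (e.toList ++ ['/']))
    then false
  else true

-- ===== PORT B =====
-- the for-loop of Source B with early return: prefix accumulator, char by char
def pvAltLoop (pubs : List (List Char)) (pre : List Char) : List Char → Bool
  | [] => true
  | c :: rest =>
    if c = '/' ∧ pre ≠ [] ∧ pre ≠ ['/'] ∧ pre ∈ pubs then false
    else pvAltLoop pubs (pre ++ [c]) rest

def requires_auth_py_alt (path : String) : Bool :=
  let public_endpoints : List String :=
    ["/", "/health", "/health/detailed", "/docs", "/openapi.json"]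
  if public_endpoints.contains path then false
  else pvAltLoop (public_endpoints.map String.toList) [] path.toList

-- ===== PRECONDITION & SPEC =====
def Spec_requires_auth_py (path : String) (out : Bool) : Prop := out = requires_auth_py_alt path
instance (path : String) (out : Bool) : Decidable (Spec_requires_auth_py path out) := by unfold Spec_requires_auth_py; infer_instance

-- ===== CLAIM (what is proved, stated in full; the proofs are below) =====
def Claim_equal_requires_auth_py : Prop := ∀ (path : String), Dom_requires_auth_py path → Spec_requires_auth_py path (requires_auth_py path)

-- ===== LEMMAS AND PROOFS =====

-- the scan returns false iff some '/'-bounded prefix qualifies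
lemma pvAltLoop_eq_false_iff (pubs : List (List Char)) :
    ∀ (rest pre : List Char),
      pvAltLoop pubs pre rest = false ↔
        ∃ m t, rest = m ++ '/' :: t ∧ (pre ++ m) ≠ [] ∧ (pre ++ m) ≠ ['/'] ∧ (pre ++ m) ∈ pubs := by
  intro rest
  induction rest with
  | nil => intro pre; simp [pvAltLoop]
  | cons c rest ih =>
      intro pre
      by_cases hc : c = '/' ∧ pre ≠ [] ∧ pre ≠ ['/'] ∧ pre ∈ pubs
      · rw [pvAltLoop, if_pos hc]
        obtain ⟨h0, h1, h2, h3⟩ := hc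
        exact iff_of_true rfl ⟨[], rest, by simp [h0], by simpa using h1, by simpa using h2,
          by simpa using h3⟩
      · rw [pvAltLoop, if_neg hc, ih]
        constructor
        · rintro ⟨m, t, hsplit, h1, h2, h3⟩
          refine ⟨c :: m, t, by simp [hsplit], by simp, by simpa using h2, by simpa using h3⟩
        · rintro ⟨m, t, hsplit, h1, h2, h3⟩
          cases m with
          | nil =>
              simp only [List.nil_append, List.cons.injEq] at hsplit
              exact absurd ⟨hsplit.1, by simpa using h1, by simpa using h2, by simpa using h3⟩ hc
          | cons c' m' =>
              simp only [List.cons_append, List.cons.injEq] at hsplit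
              obtain ⟨rfl, hrest⟩ := hsplit
              refine ⟨m', t, hrest, by simp, by simpa using h2, by simpa using h3⟩

lemma prefix_slash_iff (a L : List Char) :
    (a ++ ['/']) <+: L ↔ ∃ t, L = a ++ '/' :: t := by
  constructor
  · rintro ⟨t, ht⟩; exact ⟨t, by simpa using ht.symm⟩
  · rintro ⟨t, ht⟩; exact ⟨t, by simp [ht]⟩

-- ===== VERDICT (by name: the statement is the Claim_ definition above) =====
theorem requires_auth_py_spec : Claim_equal_requires_auth_py := by
  intro path _
  unfold Spec_requires_auth_py requires_auth_py requires_auth_py_alt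
  by_cases hmem :
      (["/", "/health", "/health/detailed", "/docs", "/openapi.json"] : List String).contains path = true
  · rw [if_pos hmem, if_pos hmem]
  · rw [if_neg hmem, if_neg hmem]
    have key : pvAltLoop ((["/", "/health", "/health/detailed", "/docs", "/openapi.json"] : List String).map String.toList) [] path.toList = false ↔
        ∃ e ∈ (["/", "/health", "/health/detailed", "/docs", "/openapi.json"] : List String),
          e ≠ "/" ∧ (e.toList ++ ['/']) <+: path.toList := by
      rw [pvAltLoop_eq_false_iff]
      constructor
      · rintro ⟨m, t, hL, h1, h2, hm⟩
        simp only [List.mem_map] at hm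
        obtain ⟨e, he, rfl⟩ := hm
        have hp : (e.toList ++ ['/']) <+: path.toList := (prefix_slash_iff _ _).2 ⟨t, hL⟩
        refine ⟨e, he, ?_, hp⟩
        intro h; subst h
        have h2' : ([] : List Char) ++ "/".toList ≠ ['/'] := h2
        exact h2' (by decide)
      · rintro ⟨e, he, hne, hpre⟩
        obtain ⟨t, ht⟩ := (prefix_slash_iff _ _).1 hpre
        refine ⟨e.toList, t, ht, ?_, ?_, List.mem_map_of_mem he⟩
        · simp only [List.nil_append]
          fin_cases he <;> decide
        · simp only [List.nil_append]
          fin_cases he <;> first | (exact absurd rfl hne) | decide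
    cases hany : ((["/", "/health", "/health/detailed", "/docs", "/openapi.json"] : List String).any
        (fun e => decide (e ≠ "/") && PySem.Chars.startswith path.toList (e.toList ++ ['/']))) with
    | true =>
        rw [if_pos rfl]
        symm
        rw [key]
        simp only [List.any_eq_true, Bool.and_eq_true, decide_eq_true_eq,
          PySem.Chars.startswith_iff] at hany
        obtain ⟨e, he, h1, h2⟩ := hany
        exact ⟨e, he, h1, h2⟩
    | false =>
        rw [if_neg (by simp)]
        symm
        have hnot : ¬ (pvAltLoop ((["/", "/health", "/health/detailed", "/docs", "/openapi.json"] : List String).map String.toList) [] path.toList = false) := by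
          rw [key]
          rintro ⟨e, he, h1, h2⟩
          rw [List.any_eq_false] at hany
          have := hany _ he
          simp only [Bool.and_eq_true, decide_eq_true_eq, PySem.Chars.startswith_iff] at this
          exact this ⟨h1, h2⟩
        cases hlv : pvAltLoop ((["/", "/health", "/health/detailed", "/docs", "/openapi.json"] : List String).map String.toList) [] path.toList with
        | false => exact absurd hlv hnot
        | true => rfl
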